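-- pv_equiv track=rewrite | github.com/JeremyVun1/ncovid-19-case-pct-by-day | lib/plotter.py | get_all_countries
-- ===== SOURCE A (Python) =====
-- def get_all_countries(regions, cmp_countries, data):
--     country_list = cmp_countries
--     for region in regions:
--         country_list = country_list + regions[region]
--
--     country_list = list(dict.fromkeys(country_list)) # remove duplicates
--
--     result = {}
--     for c in country_list:
--         if c in data:
--             result[c] = data[c]
--
--     return result
-- ===== SOURCE B (Python) =====
-- def get_all_countries(regions, cmp_countries, data):
--     # first-seen rank of every candidate country
--     rank = {}
--     for c in cmp_countries:
--         if c not in rank: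
--             rank[c] = len(rank)
--     for lst in regions.values():
--         for c in lst:
--             if c not in rank:
--                 rank[c] = len(rank)
--     # select by scanning the data keys, restore candidate order by sorting on rank
--     keep = sorted((c for c in data if c in rank), key=rank.__getitem__)
--     return {c: data[c] for c in keep}
-- ===== Notes on version B (the rewrite author's own statement) =====
-- stated objective: faster
-- what changed: B replaces A's three phases (quadratic list re-concatenation per region, dedup via dict.fromkeys, filter over the dedup list) by a first-seen rank dict built over the candidates plus a sort of the data keys by that rank; selection scans data instead of the candidate list.
import Mathlib
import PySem

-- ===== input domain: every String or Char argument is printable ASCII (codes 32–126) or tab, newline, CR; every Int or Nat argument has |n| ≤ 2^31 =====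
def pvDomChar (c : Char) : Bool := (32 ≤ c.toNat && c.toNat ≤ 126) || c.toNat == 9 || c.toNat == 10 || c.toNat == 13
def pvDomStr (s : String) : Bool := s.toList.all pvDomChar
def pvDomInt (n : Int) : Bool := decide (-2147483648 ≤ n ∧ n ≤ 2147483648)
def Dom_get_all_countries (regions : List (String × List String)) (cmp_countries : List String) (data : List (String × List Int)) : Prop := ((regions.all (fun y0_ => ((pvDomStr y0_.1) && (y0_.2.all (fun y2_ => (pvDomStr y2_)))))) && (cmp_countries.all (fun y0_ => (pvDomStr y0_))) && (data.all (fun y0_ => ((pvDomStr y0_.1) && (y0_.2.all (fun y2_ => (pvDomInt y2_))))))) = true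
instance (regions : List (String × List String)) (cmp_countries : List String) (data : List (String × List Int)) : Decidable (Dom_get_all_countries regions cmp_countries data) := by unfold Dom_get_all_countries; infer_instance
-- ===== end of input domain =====

-- B replaces A's concat/dedup/filter phases by a first-seen rank dict over the candidates and a sort of the data keys by that rank; same result, a different (sort-based) algorithm.

-- ===== PORT A =====
def get_all_countries (regions : List (String × List String)) (cmp_countries : List String) (data : List (String × List Int)) : List (String × List Int) :=
  let rd := PySem.Dict.ofList regions
  let dd := PySem.Dict.ofList data
  -- country_list = cmp_countries; for region in regions: country_list = country_list + regions[region]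
  let country_list := rd.keys.foldl (fun cl region => cl ++ rd.getD region []) cmp_countries
  -- country_list = list(dict.fromkeys(country_list))
  let country_list := PySem.List.dedup country_list
  -- result = {}; for c in country_list: if c in data: result[c] = data[c]
  let result := country_list.foldl
    (fun r c => if dd.contains c then r.insert c (dd.getD c []) else r) PySem.Dict.empty
  result.items

-- ===== PORT B =====
def get_all_countries_alt (regions : List (String × List String)) (cmp_countries : List String) (data : List (String × List Int)) : List (String × List Int) :=
  let rd := PySem.Dict.ofList regions
  let dd := PySem.Dict.ofList data
  -- rank = {}; for c in cmp_countries: if c not in rank: rank[c] = len(rank)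
  let rank := cmp_countries.foldl
    (fun d c => if d.contains c then d else d.insert c (Int.ofNat d.size)) (PySem.Dict.empty : PySem.Dict String Int)
  -- for lst in regions.values(): for c in lst: if c not in rank: rank[c] = len(rank)
  let rank := rd.values.foldl
    (fun d lst => lst.foldl (fun d c => if d.contains c then d else d.insert c (Int.ofNat d.size)) d) rank
  -- keep = sorted((c for c in data if c in rank), key=rank.__getitem__)  (every kept key is in rank, so getD is exact here)
  let keep := PySem.List.sorted (dd.keys.filter (fun c => rank.contains c)) (fun c => rank.getD c 0) false
  -- return {c: data[c] for c in keep}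
  (keep.foldl (fun r c => r.insert c (dd.getD c [])) PySem.Dict.empty).items

-- ===== PRECONDITION & SPEC =====
def Spec_get_all_countries (regions : List (String × List String)) (cmp_countries : List String) (data : List (String × List Int)) (out : List (String × List Int)) : Prop := out = get_all_countries_alt regions cmp_countries data
instance (regions : List (String × List String)) (cmp_countries : List String) (data : List (String × List Int)) (out : List (String × List Int)) : Decidable (Spec_get_all_countries regions cmp_countries data out) := by unfold Spec_get_all_countries; infer_instance

-- ===== CLAIM (what is proved, stated in full; the proofs are below) =====
def Claim_equal_get_all_countries : Prop := ∀ (regions : List (String × List String)) (cmp_countries : List String) (data : List (String × List Int)), Dom_get_all_countries regions cmp_countries data → Spec_get_all_countries regions cmp_countries data (get_all_countries regions cmp_countries data)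

-- ===== LEMMAS AND PROOFS =====

/-- The part of the ordered dedup of `L` that is new relative to the already-seen list `s`. -/
def pvDedupFrom (s L : List String) : List String :=
  match L with
  | [] => []
  | c :: t => if c ∈ s then pvDedupFrom s t else c :: pvDedupFrom (s ++ [c]) t

theorem pv_foldl_add_eq_dedupFrom (L : List String) : ∀ (s : List String),
    L.foldl PySem.Set.add s = s ++ pvDedupFrom s L := by
  induction L with
  | nil => intro s; simp [pvDedupFrom]
  | cons c t ih =>
    intro s
    rw [List.foldl_cons, PySem.Set.add_eq_ite]
    by_cases h : c ∈ s
    · rw [if_pos h, ih s]; simp [pvDedupFrom, h]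
    · rw [if_neg h, ih (s ++ [c])]; simp [pvDedupFrom, h]

theorem pv_dedup_eq (L : List String) : PySem.List.dedup L = pvDedupFrom [] L := by
  have h := pv_foldl_add_eq_dedupFrom L []
  simpa [PySem.List.dedup, PySem.Set.ofList_eq_foldl] using h

/-- `enumFrom n l` pairs the elements of `l` with consecutive Int indices starting at `n`. -/
def pvEnumFrom (n : Nat) (l : List String) : List (String × Int) :=
  match l with
  | [] => []
  | c :: t => (c, Int.ofNat n) :: pvEnumFrom (n + 1) t

theorem pv_map_fst_enumFrom (l : List String) : ∀ n, (pvEnumFrom n l).map (·.1) = l := by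
  induction l with
  | nil => intro n; simp [pvEnumFrom]
  | cons c t ih => intro n; simp [pvEnumFrom, ih]

theorem pv_rank_fold (L : List String) : ∀ (d : PySem.Dict String Int),
    L.foldl (fun d c => if d.contains c then d else d.insert c (Int.ofNat d.size)) d
      = PySem.Dict.mk (d.items ++ pvEnumFrom d.size (pvDedupFrom (d.keys) L)) := by
  induction L with
  | nil => intro d; simp [pvDedupFrom, pvEnumFrom]
  | cons c t ih =>
    intro d
    rw [List.foldl_cons]
    by_cases h : c ∈ d.keys
    · have hc : d.contains c = true := by
        rw [PySem.Dict.contains_eq_decide_mem_keys]; simpa using h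
      rw [if_pos hc, ih d]
      simp [pvDedupFrom, h]
    · have hc : d.contains c = false := by
        rw [PySem.Dict.contains_eq_decide_mem_keys]; simpa using h
      rw [if_neg (by simp [hc]), ih (d.insert c (Int.ofNat d.size))]
      rw [PySem.Dict.items_insert_of_not_contains d _ hc]
      rw [PySem.Dict.keys_insert_of_not_contains d _ hc]
      simp [pvDedupFrom, h, PySem.Dict.size, pvEnumFrom,
        PySem.Dict.items_insert_of_not_contains d _ hc]

theorem pv_getD_enumFrom_ge (l : List String) : ∀ (n : Nat) (c : String), c ∈ l →
    Int.ofNat n ≤ (PySem.Dict.mk (pvEnumFrom n l)).getD c 0 := by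
  induction l with
  | nil => intro n c h; simp at h
  | cons a t ih =>
    intro n c h
    rw [pvEnumFrom, PySem.Dict.getD_eq_get?_getD, PySem.Dict.get?_mk_cons]
    by_cases he : (a == c) = true
    · simp [he]
    · rw [Bool.not_eq_true] at he
      rw [he]
      simp only [Bool.false_eq_true, if_false]
      rw [← PySem.Dict.getD_eq_get?_getD]
      have hne : a ≠ c := by simpa using he
      have hmem : c ∈ t := by
        rcases List.mem_cons.mp h with h | h
        · exact absurd h.symm hne
        · exact h
      calc Int.ofNat n ≤ Int.ofNat (n + 1) := Int.ofNat_le.mpr (Nat.le_succ n)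
        _ ≤ _ := ih (n + 1) c hmem

theorem pv_pairwise_enum (l : List String) : ∀ (n : Nat), l.Nodup →
    l.Pairwise (fun a b => (PySem.Dict.mk (pvEnumFrom n l)).getD a 0 < (PySem.Dict.mk (pvEnumFrom n l)).getD b 0) := by
  induction l with
  | nil => intro n _; simp
  | cons c t ih =>
    intro n hnd
    rw [List.nodup_cons] at hnd
    have hgetc : (PySem.Dict.mk (pvEnumFrom n (c :: t))).getD c 0 = Int.ofNat n := by
      rw [pvEnumFrom, PySem.Dict.getD_eq_get?_getD, PySem.Dict.get?_mk_cons]; simp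
    have hgett : ∀ b ∈ t, (PySem.Dict.mk (pvEnumFrom n (c :: t))).getD b 0
        = (PySem.Dict.mk (pvEnumFrom (n + 1) t)).getD b 0 := by
      intro b hb
      have hne : (c == b) = false := by
        simp only [beq_eq_false_iff_ne, ne_eq]
        intro hcb; exact hnd.1 (hcb ▸ hb)
      rw [pvEnumFrom, PySem.Dict.getD_eq_get?_getD, PySem.Dict.get?_mk_cons, hne]
      simp only [Bool.false_eq_true, if_false]
      rw [← PySem.Dict.getD_eq_get?_getD]
    constructor
    · intro b hb
      rw [hgetc, hgett b hb]
      calc Int.ofNat n < Int.ofNat (n + 1) := Int.ofNat_lt.mpr (Nat.lt_succ_self n)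
        _ ≤ _ := pv_getD_enumFrom_ge t (n + 1) b hb
    · refine (ih (n + 1) hnd.2).imp_of_mem ?_
      intro a b ha hb hR
      rw [hgett a ha, hgett b hb]
      exact hR

-- ===== VERDICT (by name: the statement is the Claim_ definition above) =====
theorem get_all_countries_spec : Claim_equal_get_all_countries := by
  intro regions cmp_countries data _
  unfold Spec_get_all_countries
  simp only [get_all_countries, get_all_countries_alt]
  set rd := PySem.Dict.ofList regions with hrd
  set dd := PySem.Dict.ofList data with hdd
  -- both candidate traversals are cmp ++ flatten of the region values
  have h1 : rd.keys.foldl (fun cl region => cl ++ rd.getD region []) cmp_countries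
      = cmp_countries ++ rd.values.flatten := by
    rw [PySem.List.foldl_append_eq_flatMap]
    rw [PySem.Dict.values_eq_map_keys _ (PySem.Dict.nodup_keys_ofList regions) []]
    rw [List.flatMap_def]
  have h2 : rd.values.foldl
      (fun d lst => lst.foldl (fun d c => if d.contains c then d else d.insert c (Int.ofNat d.size)) d)
      (cmp_countries.foldl (fun d c => if d.contains c then d else d.insert c (Int.ofNat d.size)) (PySem.Dict.empty : PySem.Dict String Int))
      = (cmp_countries ++ rd.values.flatten).foldl
          (fun d c => if d.contains c then d else d.insert c (Int.ofNat d.size)) PySem.Dict.empty := by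
    rw [List.foldl_append, List.foldl_flatten]
  rw [h1, h2]
  set cand := cmp_countries ++ rd.values.flatten with hcand
  -- the rank dict is the enumeration of the ordered dedup of the candidates
  have hrank : cand.foldl (fun d c => if d.contains c then d else d.insert c (Int.ofNat d.size)) (PySem.Dict.empty : PySem.Dict String Int)
      = PySem.Dict.mk (pvEnumFrom 0 (pvDedupFrom [] cand)) := by
    rw [pv_rank_fold]; rfl
  rw [hrank, pv_dedup_eq]
  set D := pvDedupFrom [] cand with hD
  set rank := PySem.Dict.mk (pvEnumFrom 0 D) with hrankd
  have hDnd : D.Nodup := by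
    rw [hD, ← pv_dedup_eq]; exact PySem.List.nodup_dedup cand
  have hDkeys : rank.keys = D := by
    rw [hrankd]; exact pv_map_fst_enumFrom D 0
  -- the sorted data keys ARE A's filtered dedup list
  set LA := D.filter (fun c => dd.contains c) with hLA
  have hsorted : PySem.List.sorted (dd.keys.filter (fun c => rank.contains c)) (fun c => rank.getD c 0) false = LA := by
    apply PySem.List.sorted_eq_of_perm_of_pairwise_lt
    · have hddnd : dd.keys.Nodup := hdd ▸ PySem.Dict.nodup_keys_ofList data
      rw [List.perm_ext_iff_of_nodup (hDnd.filter _) (hddnd.filter _)]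
      intro c
      simp only [List.mem_filter, PySem.Dict.contains_eq_decide_mem_keys, hDkeys,
        decide_eq_true_eq]
      tauto
    · exact List.Pairwise.filter _ (pv_pairwise_enum D 0 hDnd)
  rw [hsorted]
  -- A's result loop is the same insert fold over LA
  rw [PySem.List.foldl_if_eq_foldl_filter (fun c => dd.contains c)
    (fun r c => r.insert c (dd.getD c [])) D PySem.Dict.empty]
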